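-- pv_equiv track=rewrite | github.com/fllin1/mwplu_analysis | src/extract/clean_text.py | reassemble_chunks
-- ===== SOURCE A (Python) =====
-- def reassemble_chunks(cleaned_chunks, overlap=200):
--     """
--     Reassemble cleaned chunks into a single coherent text.
--
--     Args:
--         cleaned_chunks (list): List of cleaned text chunks
--         overlap (int): Approximate overlap size used when creating chunks
--
--     Returns:
--         str: Reassembled text
--     """
--     if not cleaned_chunks:
--         return ""
--
--     if len(cleaned_chunks) == 1:
--         return cleaned_chunks[0]
--
--     result = cleaned_chunks[0]
--
--     for i in range(1, len(cleaned_chunks)):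
--         current_chunk = cleaned_chunks[i]
--         previous_chunk = result
--
--         # Find the best joining point using fuzzy matching
--         # We'll use a simplified approach here - find the largest common substring
--         # near the end of the previous chunk and the start of the current chunk
--
--         # Take the end of previous chunk and start of current chunk
--         prev_end = previous_chunk[-min(len(previous_chunk), overlap * 2) :]
--         curr_start = current_chunk[: min(len(current_chunk), overlap * 2)]
--
--         # Find the largest common substring
--         best_match_size = 0
--         best_match_pos_prev = len(prev_end)
--         best_match_pos_curr = 0
--
--         for i in range(min(len(prev_end), len(curr_start))):
--             for j in range(i + 1, min(len(prev_end), len(curr_start)) + 1):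
--                 substring = prev_end[i:j]
--                 if (
--                     len(substring) > 20 and substring in curr_start
--                 ):  # Only consider substrings > 20 chars
--                     curr_pos = curr_start.find(substring)
--                     if j - i > best_match_size:
--                         best_match_size = j - i
--                         best_match_pos_prev = len(previous_chunk) - len(prev_end) + i
--                         best_match_pos_curr = curr_pos
--
--         # If we found a good match, use it as the joining point
--         if best_match_size > 20:
--             result = (
--                 previous_chunk[:best_match_pos_prev]
--                 + current_chunk[best_match_pos_curr:]
--             )
--         else:
--             # Fallback: simple concatenation with the last overlap removed
--             result = result + " " + current_chunk
--
--     return result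
-- ===== SOURCE B (Python) =====
-- def reassemble_chunks(cleaned_chunks, overlap=200):
--     """Reassemble cleaned chunks into a single coherent text (exact rewrite).
--
--     Instead of enumerating every (start, end) substring pair of the previous
--     window and testing each against the current window, do a single
--     left-to-right scan over start positions with a monotonically growing best
--     length: each start only ever probes a one-character extension of the
--     current best match.
--     """
--     if not cleaned_chunks:
--         return ""
--     result = cleaned_chunks[0]
--     for current_chunk in cleaned_chunks[1:]:
--         prev_end = result[-min(len(result), overlap * 2):]
--         curr_start = current_chunk[: min(len(current_chunk), overlap * 2)]
--         limit = min(len(prev_end), len(curr_start))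
--         best = 20          # matches must be longer than 20 characters
--         best_i = -1
--         for i in range(limit):
--             while best < limit - i and prev_end[i : i + best + 1] in curr_start:
--                 best += 1
--                 best_i = i
--         if best_i >= 0:
--             match = prev_end[best_i : best_i + best]
--             pos_prev = len(result) - len(prev_end) + best_i
--             pos_curr = curr_start.find(match)
--             result = result[:pos_prev] + current_chunk[pos_curr:]
--         else:
--             result = result + " " + current_chunk
--     return result
-- ===== Notes on version B (the rewrite author's own statement) =====
-- stated objective: alternative
-- what changed: A enumerates every (start,end) substring pair of the boundary window and tests each against the other window, keeping a running best; B finds the same longest boundary match with a single left-to-right scan over start positions whose best length only grows, probing just a one-character extension of the current best at each step (far fewer substring probes per join, though on large inputs the shared whole-result string rebuilding dominates both).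
import Mathlib
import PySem

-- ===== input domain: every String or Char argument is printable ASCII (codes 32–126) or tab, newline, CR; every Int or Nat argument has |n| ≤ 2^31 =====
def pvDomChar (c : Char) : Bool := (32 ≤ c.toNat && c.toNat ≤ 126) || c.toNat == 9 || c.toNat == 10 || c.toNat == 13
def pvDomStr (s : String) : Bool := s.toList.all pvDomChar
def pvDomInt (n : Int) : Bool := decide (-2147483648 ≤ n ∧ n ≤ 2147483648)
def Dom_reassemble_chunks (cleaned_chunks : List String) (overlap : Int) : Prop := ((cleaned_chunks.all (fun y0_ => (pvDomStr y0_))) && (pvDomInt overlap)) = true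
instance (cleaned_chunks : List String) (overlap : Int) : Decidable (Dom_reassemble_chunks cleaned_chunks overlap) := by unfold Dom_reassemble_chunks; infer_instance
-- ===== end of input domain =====

-- B replaces A's enumeration of every (start,end) substring pair of the boundary window by a
-- single scan with a monotonically growing best length (each start position only ever probes a
-- one-character extension of the current best match): a different search algorithm, same value.

-- ===== PORT A =====

-- the nested search loops of A: state (best_match_size, best_match_pos_prev, best_match_pos_curr)
def pvSearchA (p c : List Char) (L plen : Int) : Int × Int × Int :=
  (PySem.List.pyRange 0 L 1).foldl (fun s i =>
    (PySem.List.pyRange (i + 1) (L + 1) 1).foldl (fun s j =>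
      let substring := PySem.List.slice p (some i) (some j)
      if PySem.List.len substring > 20 ∧ PySem.Chars.isIn substring c = true then
        let curr_pos := PySem.Chars.find c substring
        if j - i > s.1 then (j - i, plen - PySem.List.len p + i, curr_pos) else s
      else s) s)
    (0, PySem.List.len p, 0)

-- one iteration of A's outer `for i in range(1, len(cleaned_chunks))` loop body
def pvJoinA (overlap : Int) (result current_chunk : String) : String :=
  let previous := result.toList
  let curr := current_chunk.toList
  let prev_end := PySem.List.slice previous (some (-(min (PySem.List.len previous) (overlap * 2)))) none
  let curr_start := PySem.List.slice curr none (some (min (PySem.List.len curr) (overlap * 2)))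
  let L := min (PySem.List.len prev_end) (PySem.List.len curr_start)
  let st := pvSearchA prev_end curr_start L (PySem.List.len previous)
  if st.1 > 20 then
    String.ofList (PySem.List.slice previous none (some st.2.1) ++ PySem.List.slice curr (some st.2.2) none)
  else
    String.ofList (previous ++ [' '] ++ curr)

def reassemble_chunks (cleaned_chunks : List String) (overlap : Int) : String :=
  if cleaned_chunks = [] then ""
  else if PySem.List.len cleaned_chunks = 1 then PySem.List.pyGetD cleaned_chunks 0 ""
  else
    (PySem.List.pyRange 1 (PySem.List.len cleaned_chunks) 1).foldl
      (fun result i => pvJoinA overlap result (PySem.List.pyGetD cleaned_chunks i ""))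
      (PySem.List.pyGetD cleaned_chunks 0 "")

-- ===== PORT B =====

-- B's inner `while best < limit - i and prev_end[i : i + best + 1] in curr_start` loop
def pvClimb (p c : List Char) (limit i : Nat) (best : Nat) (best_i : Int) : Nat × Int :=
  if h : best < limit - i ∧
      PySem.Chars.isIn (PySem.List.slice p (some (i : Int)) (some ((i : Int) + (best : Int) + 1))) c = true then
    pvClimb p c limit i (best + 1) (i : Int)
  else (best, best_i)
termination_by limit - i - best
decreasing_by omega

-- B's `for i in range(limit)` scan, state (best, best_i)
def pvSearchB (p c : List Char) (limit : Nat) : Nat × Int :=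
  (List.range limit).foldl (fun s i => pvClimb p c limit i s.1 s.2) (20, -1)

-- one iteration of B's `for current_chunk in cleaned_chunks[1:]` loop body
def pvJoinB (overlap : Int) (result current_chunk : String) : String :=
  let previous := result.toList
  let curr := current_chunk.toList
  let prev_end := PySem.List.slice previous (some (-(min (PySem.List.len previous) (overlap * 2)))) none
  let curr_start := PySem.List.slice curr none (some (min (PySem.List.len curr) (overlap * 2)))
  let limit := min prev_end.length curr_start.length
  let st := pvSearchB prev_end curr_start limit
  if st.2 ≥ 0 then
    let mtch := PySem.List.slice prev_end (some st.2) (some (st.2 + (st.1 : Int)))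
    let pos_prev := PySem.List.len previous - PySem.List.len prev_end + st.2
    let pos_curr := PySem.Chars.find curr_start mtch
    String.ofList (PySem.List.slice previous none (some pos_prev) ++ PySem.List.slice curr (some pos_curr) none)
  else
    String.ofList (previous ++ [' '] ++ curr)

def reassemble_chunks_alt (cleaned_chunks : List String) (overlap : Int) : String :=
  match cleaned_chunks with
  | [] => ""
  | c0 :: rest => rest.foldl (fun result cur => pvJoinB overlap result cur) c0

-- ===== PRECONDITION & SPEC =====
def Spec_reassemble_chunks (cleaned_chunks : List String) (overlap : Int) (out : String) : Prop := out = reassemble_chunks_alt cleaned_chunks overlap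
instance (cleaned_chunks : List String) (overlap : Int) (out : String) : Decidable (Spec_reassemble_chunks cleaned_chunks overlap out) := by unfold Spec_reassemble_chunks; infer_instance

-- ===== CLAIM (what is proved, stated in full; the proofs are below) =====
def Claim_equal_reassemble_chunks : Prop := ∀ (cleaned_chunks : List String) (overlap : Int), Dom_reassemble_chunks cleaned_chunks overlap → Spec_reassemble_chunks cleaned_chunks overlap (reassemble_chunks cleaned_chunks overlap)

-- ===== LEMMAS AND PROOFS =====

-- m(i): greatest l ≤ limit - i such that p[i:i+l] occurs in c (0 always qualifies)
def pvM (p c : List Char) (limit i : Nat) : Nat :=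
  Nat.findGreatest (fun l => PySem.Chars.isIn ((p.drop i).take l) c = true) (limit - i)

-- occurrence is monotone in the substring length
theorem pvP_mono (p c : List Char) (i : Nat) {l l' : Nat} (hll : l' ≤ l)
    (h : PySem.Chars.isIn ((p.drop i).take l) c = true) :
    PySem.Chars.isIn ((p.drop i).take l') c = true := by
  rw [PySem.Chars.isIn_iff_infix] at h ⊢
  have h1 : (p.drop i).take l' = ((p.drop i).take l).take l' := by
    rw [List.take_take, min_eq_left hll]
  rw [h1]
  exact (List.take_prefix _ _).isInfix.trans h

theorem pvM_le (p c : List Char) (limit i : Nat) : pvM p c limit i ≤ limit - i :=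
  Nat.findGreatest_le _

theorem pvM_spec (p c : List Char) (limit i : Nat) :
    PySem.Chars.isIn ((p.drop i).take (pvM p c limit i)) c = true := by
  have h0 : PySem.Chars.isIn ((p.drop i).take 0) c = true := by
    rw [List.take_zero]; exact PySem.Chars.isIn_nil c
  unfold pvM
  exact Nat.findGreatest_spec
    (P := fun l => PySem.Chars.isIn ((p.drop i).take l) c = true) (Nat.zero_le _) h0

theorem pvP_iff_le (p c : List Char) (limit i : Nat) {l : Nat} (hl : l ≤ limit - i) :
    (PySem.Chars.isIn ((p.drop i).take l) c = true) ↔ l ≤ pvM p c limit i := by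
  constructor
  · intro h
    by_contra hc
    have hc2 : pvM p c limit i < l := by omega
    unfold pvM at hc2
    exact Nat.findGreatest_is_greatest hc2 hl h
  · intro h
    exact pvP_mono p c i h (pvM_spec p c limit i)

-- B's while loop computes: climb to m(i) (recording i) if it beats best, else do nothing
theorem climb_eq (p c : List Char) (limit i : Nat) (best : Nat) (bi : Int) :
    pvClimb p c limit i best bi =
      if best < pvM p c limit i then (pvM p c limit i, (i : Int)) else (best, bi) := by
  fun_induction pvClimb p c limit i best bi with
  | case1 best bi h ih =>
    have hslice : PySem.List.slice p (some (i : Int)) (some ((i : Int) + (best : Int) + 1))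
        = (p.drop i).take (best + 1) := by
      have : ((i : Int) + (best : Int) + 1) = (i : Int) + ((best + 1 : Nat) : Int) := by push_cast; ring
      rw [this, PySem.List.slice_natCast_add]
    rw [hslice] at h
    have hle : best + 1 ≤ pvM p c limit i :=
      (pvP_iff_le p c limit i (by omega)).1 h.2
    rw [ih]
    split_ifs with h1 h2 h2 <;> first
      | rfl
      | (exfalso; omega)
      | (have : best + 1 = pvM p c limit i := by omega
         rw [← this])
  | case2 best bi h =>
    have hnot : ¬ best < pvM p c limit i := by
      intro hlt
      have h1 : best + 1 ≤ pvM p c limit i := hlt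
      have h2 : pvM p c limit i ≤ limit - i := pvM_le p c limit i
      have hP : PySem.Chars.isIn ((p.drop i).take (best + 1)) c = true :=
        pvP_mono p c i h1 (pvM_spec p c limit i)
      apply h
      constructor
      · omega
      · have : ((i : Int) + (best : Int) + 1) = (i : Int) + ((best + 1 : Nat) : Int) := by push_cast; ring
        rw [this, PySem.List.slice_natCast_add]
        exact hP
    rw [if_neg hnot]

-- A's inner loop body, re-indexed by the substring LENGTH l = j - i (a proof-side normal form)
def pvGA (p c : List Char) (plen : Int) (i : Nat) (s : Int × Int × Int) (l : Nat) : Int × Int × Int :=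
  if ((l : Int) > 20 ∧ PySem.Chars.isIn ((p.drop i).take l) c = true) then
    (if (l : Int) > s.1 then ((l : Int), plen - PySem.List.len p + (i : Int), PySem.Chars.find c ((p.drop i).take l)) else s)
  else s

def pvInnerN (p c : List Char) (plen : Int) (i : Nat) (s : Int × Int × Int) (t : Nat) : Int × Int × Int :=
  (List.range t).foldl (fun s k => pvGA p c plen i s (k + 1)) s

def pvSearchN (p c : List Char) (plen : Int) (limit : Nat) : Int × Int × Int :=
  (List.range limit).foldl (fun s i => pvInnerN p c plen i s (limit - i)) (0, PySem.List.len p, 0)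

theorem searchA_eq (p c : List Char) (plen : Int) (limit : Nat) (hp : limit ≤ p.length) :
    pvSearchA p c (limit : Int) plen = pvSearchN p c plen limit := by
  unfold pvSearchA pvSearchN
  rw [PySem.List.pyRange_zero_nat, List.foldl_map]
  apply PySem.List.foldl_congr_mem
  intro s x hx
  rw [List.mem_range] at hx
  have hr : PySem.List.pyRange ((x : Int) + 1) ((limit : Int) + 1) 1
      = (List.range (limit - x)).map (fun k => (((x + 1 + k : Nat)) : Int)) := by
    apply List.ext_getElem
    · rw [PySem.List.length_pyRange_one, List.length_map, List.length_range]
      omega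
    · intro n h1 h2
      rw [PySem.List.getElem_pyRange_one]
      simp only [List.getElem_map, List.getElem_range]
      push_cast
      ring
  rw [hr, List.foldl_map]
  unfold pvInnerN
  apply PySem.List.foldl_congr_mem
  intro s' k hk
  rw [List.mem_range] at hk
  have hidx : (((x + 1 + k : Nat)) : Int) = (x : Int) + ((k + 1 : Nat) : Int) := by push_cast; ring
  have hsub : ((x : Int) + ((k + 1 : Nat) : Int)) - (x : Int) = ((k + 1 : Nat) : Int) := by ring
  have hlen : PySem.List.len ((p.drop x).take (k + 1)) = ((k + 1 : Nat) : Int) := by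
    rw [PySem.List.len_eq, List.length_take, List.length_drop]
    exact_mod_cast congrArg (Nat.cast (R := Int)) (by omega : min (k + 1) (p.length - x) = k + 1)
  simp only [hidx, PySem.List.slice_natCast_add, hsub, hlen, pvGA]

theorem innerN_eq (p c : List Char) (plen : Int) (limit i : Nat) :
    ∀ t, t ≤ limit - i → ∀ s : Int × Int × Int,
      pvInnerN p c plen i s t =
        if max s.1 20 < ((min (pvM p c limit i) t : Nat) : Int) then
          (((min (pvM p c limit i) t : Nat) : Int), plen - PySem.List.len p + (i : Int),
            PySem.Chars.find c ((p.drop i).take (min (pvM p c limit i) t)))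
        else s := by
  intro t
  induction t with
  | zero =>
    intro _ s
    have hc : ¬ (max s.1 20 < ((min (pvM p c limit i) 0 : Nat) : Int)) := by
      simp only [Nat.min_zero, Nat.cast_zero]
      have := le_max_right s.1 (20 : Int)
      omega
    rw [if_neg hc]
    rfl
  | succ t ih =>
    intro h s
    have hstep : pvInnerN p c plen i s (t + 1) = pvGA p c plen i (pvInnerN p c plen i s t) (t + 1) := by
      simp [pvInnerN, List.range_succ]
    rw [hstep, ih (by omega)]
    have hiff := pvP_iff_le p c limit i (l := t + 1) h
    by_cases hP : t + 1 ≤ pvM p c limit i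
    · have hmin1 : min (pvM p c limit i) (t + 1) = t + 1 := by omega
      have hmint : min (pvM p c limit i) t = t := by omega
      rw [hmint, hmin1]
      by_cases h20 : (20 : Int) < ((t + 1 : Nat) : Int)
      · unfold pvGA
        by_cases hs : max s.1 20 < ((t : Nat) : Int)
        · rw [if_pos hs, if_pos ⟨h20, hiff.2 hP⟩, if_pos (by push_cast at h20 hs ⊢; omega),
            if_pos (by push_cast at h20 hs ⊢; omega)]
        · rw [if_neg hs, if_pos ⟨h20, hiff.2 hP⟩]
          by_cases hs2 : ((t + 1 : Nat) : Int) > s.1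
          · rw [if_pos hs2, if_pos (by push_cast at h20 hs hs2 ⊢; omega)]
          · rw [if_neg hs2, if_neg (by push_cast at h20 hs hs2 ⊢; omega)]
      · unfold pvGA
        rw [if_neg (fun hcon => h20 hcon.1),
          if_neg (by push_cast at h20 ⊢; omega), if_neg (by push_cast at h20 ⊢; omega)]
    · have hmin : min (pvM p c limit i) (t + 1) = min (pvM p c limit i) t := by omega
      rw [hmin]
      unfold pvGA
      rw [if_neg (fun hcon => hP (hiff.1 hcon.2))]

-- the coupling of A's and B's scans over start positions
theorem couple (p c : List Char) (plen : Int) (limit : Nat) :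
    ∀ k, k ≤ limit →
      (((List.range k).foldl (fun s i => pvInnerN p c plen i s (limit - i)) (0, PySem.List.len p, 0)
          = (0, PySem.List.len p, 0)) ∧
        ((List.range k).foldl (fun s i => pvClimb p c limit i s.1 s.2) (20, -1) = (20, -1)))
      ∨ (∃ i0, i0 < k ∧ 20 < pvM p c limit i0 ∧
          (List.range k).foldl (fun s i => pvInnerN p c plen i s (limit - i)) (0, PySem.List.len p, 0)
            = (((pvM p c limit i0 : Nat) : Int), plen - PySem.List.len p + (i0 : Int),
               PySem.Chars.find c ((p.drop i0).take (pvM p c limit i0))) ∧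
          (List.range k).foldl (fun s i => pvClimb p c limit i s.1 s.2) (20, -1)
            = (pvM p c limit i0, (i0 : Int))) := by
  intro k
  induction k with
  | zero => intro _; left; exact ⟨rfl, rfl⟩
  | succ k ih =>
    intro hk
    rw [List.range_succ, List.foldl_append, List.foldl_append]
    simp only [List.foldl_cons, List.foldl_nil]
    have hminm : min (pvM p c limit k) (limit - k) = pvM p c limit k := by
      have := pvM_le p c limit k; omega
    rcases ih (by omega) with ⟨hA, hB⟩ | ⟨i0, hi0, hm0, hA, hB⟩
    · rw [hA, hB, innerN_eq p c plen limit k (limit - k) le_rfl _, climb_eq, hminm]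
      by_cases hgt : 20 < pvM p c limit k
      · rw [if_pos (by push_cast; omega), if_pos hgt]
        right; exact ⟨k, by omega, hgt, rfl, rfl⟩
      · rw [if_neg (by push_cast; omega), if_neg hgt]
        left; exact ⟨rfl, rfl⟩
    · rw [hA, hB, innerN_eq p c plen limit k (limit - k) le_rfl _, climb_eq, hminm]
      by_cases hgt : pvM p c limit i0 < pvM p c limit k
      · rw [if_pos (by push_cast; omega), if_pos hgt]
        right; exact ⟨k, by omega, by omega, rfl, rfl⟩
      · rw [if_neg (by push_cast; omega), if_neg hgt]
        right; exact ⟨i0, by omega, hm0, rfl, rfl⟩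

theorem join_eq (overlap : Int) (r cur : String) : pvJoinA overlap r cur = pvJoinB overlap r cur := by
  unfold pvJoinA pvJoinB
  dsimp only
  generalize r.toList = previous
  generalize cur.toList = curr
  generalize PySem.List.slice previous (some (-(min (PySem.List.len previous) (overlap * 2)))) none = p
  generalize PySem.List.slice curr none (some (min (PySem.List.len curr) (overlap * 2))) = c
  have hL : min (PySem.List.len p) (PySem.List.len c) = ((min p.length c.length : Nat) : Int) := by
    rw [PySem.List.len_eq, PySem.List.len_eq, Nat.cast_min]
  rw [hL, searchA_eq p c (PySem.List.len previous) (min p.length c.length) (min_le_left _ _)]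
  unfold pvSearchN pvSearchB
  rcases couple p c (PySem.List.len previous) (min p.length c.length) (min p.length c.length) le_rfl
    with ⟨hA, hB⟩ | ⟨i0, _, hm0, hA, hB⟩
  · rw [hA, hB]
    norm_num
  · rw [hA, hB]
    rw [if_pos (show ((pvM p c (min p.length c.length) i0 : Nat) : Int) > 20 by exact_mod_cast hm0),
      if_pos (show ((i0 : Nat) : Int) ≥ 0 by positivity),
      PySem.List.slice_natCast_add]

theorem map_getD_range {α : Type} (l : List α) (d : α) :
    (List.range l.length).map (fun k => l.getD k d) = l := by
  apply List.ext_getElem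
  · simp
  · intro i h1 h2
    simp [List.getD_eq_getElem?_getD, List.getElem?_eq_getElem h2]

theorem fold_range_eq {α : Type} (c0 : α) (rest : List α) (d : α) (f : α → α → α) :
    (PySem.List.pyRange 1 (PySem.List.len (c0 :: rest)) 1).foldl
        (fun r i => f r (PySem.List.pyGetD (c0 :: rest) i d)) c0
      = rest.foldl f c0 := by
  have hlen : PySem.List.len (c0 :: rest) = ((rest.length + 1 : Nat) : Int) := by
    rw [PySem.List.len_eq]; push_cast; simp
  rw [hlen, PySem.List.pyRange_one, List.foldl_map]
  have ht : (((rest.length + 1 : Nat) : Int) - 1).toNat = rest.length := by omega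
  rw [ht]
  conv_rhs => rw [← map_getD_range rest d, List.foldl_map]
  apply PySem.List.foldl_congr_mem
  intro acc k _
  have h1 : (1 + (k : Int)) = ((k + 1 : Nat) : Int) := by push_cast; ring
  rw [h1, PySem.List.pyGetD_natCast, List.getD_cons_succ]

-- ===== VERDICT (by name: the statement is the Claim_ definition above) =====
theorem reassemble_chunks_spec : Claim_equal_reassemble_chunks := by
  intro chunks overlap _
  unfold Spec_reassemble_chunks
  match chunks with
  | [] => rfl
  | c0 :: rest =>
    show reassemble_chunks (c0 :: rest) overlap = rest.foldl (fun r cur => pvJoinB overlap r cur) c0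
    unfold reassemble_chunks
    rw [if_neg (by simp)]
    by_cases h1 : PySem.List.len (c0 :: rest) = 1
    · have hre : rest = [] := by
        rw [PySem.List.len_eq] at h1
        simp only [List.length_cons] at h1
        have : rest.length = 0 := by omega
        exact List.eq_nil_of_length_eq_zero this
      subst hre
      simp
    · rw [if_neg h1, PySem.List.pyGetD_zero_cons,
        fold_range_eq c0 rest "" (fun r cur => pvJoinA overlap r cur)]
      exact PySem.List.foldl_congr_mem rest _ _ c0 (fun acc x _ => join_eq overlap acc x)
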